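-- pv_equiv track=rewrite | github.com/dpvasani/SwarProf | Backend/src/controllers/artist_controller.py | _extract_gharana_name
-- ===== SOURCE A (Python) =====
-- def _extract_gharana_name(lines: list, text_lower: str) -> str:
--     """Extract gharana name from text"""
--     gharana_name = None
--     if 'gharana' in text_lower:
--         for line in lines:
--             if 'gharana' in line.lower():
--                 words = line.split()
--                 for i, word in enumerate(words):
--                     if 'gharana' in word.lower() and i > 0:
--                         gharana_name = words[i-1]
--                         break
--                 break
--     return gharana_name
-- ===== SOURCE B (Python) =====
-- import re
-- def _extract_gharana_name(lines: list, text_lower: str) -> str: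
--     """Extract gharana name from text"""
--     gharana_name = None
--     if 'gharana' in text_lower:
--         for line in lines:
--             if 'gharana' in line.lower():
--                 m = re.search(r'(\S+)\s+\S*gharana', line, re.IGNORECASE)
--                 if m:
--                     gharana_name = m.group(1)
--                 break
--     return gharana_name
-- ===== Notes on version B (the rewrite author's own statement) =====
-- stated objective: idiomatic
-- what changed: On the first line containing 'gharana', B replaces A's split()/enumerate tokenization with index bookkeeping and words[i-1] by a single character-level regex extraction re.search(r'(\S+)\s+\S*gharana', line, re.IGNORECASE) whose capture group is the word before the gharana-token.
import Mathlib
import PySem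

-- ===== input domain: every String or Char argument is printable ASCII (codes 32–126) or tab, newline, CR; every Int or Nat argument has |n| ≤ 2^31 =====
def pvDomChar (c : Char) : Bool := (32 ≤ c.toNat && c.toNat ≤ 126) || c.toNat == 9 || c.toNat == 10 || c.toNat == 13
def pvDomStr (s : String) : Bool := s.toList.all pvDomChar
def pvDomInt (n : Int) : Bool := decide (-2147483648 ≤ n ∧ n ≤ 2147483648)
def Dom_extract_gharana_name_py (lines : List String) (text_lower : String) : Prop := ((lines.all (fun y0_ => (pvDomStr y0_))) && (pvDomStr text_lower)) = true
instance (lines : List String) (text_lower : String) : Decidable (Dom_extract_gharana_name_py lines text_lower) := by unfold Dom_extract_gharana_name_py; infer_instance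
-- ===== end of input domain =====

-- B keeps A's guard and line loop but replaces the split()/enumerate word scan with a single
-- regex extraction re.search(r'(\S+)\s+\S*gharana', line, re.IGNORECASE) (idiomatic; same cost).

-- ===== PORT A =====

-- inner loop of A: 'for i, word in enumerate(words): if 'gharana' in word.lower() and i > 0: gharana_name = words[i-1]; break'
def pvAInnerGo (words : List String) : List (Int × String) → Option String
  | [] => none
  | (i, w) :: rest =>
    if PySem.Str.isIn "gharana" (PySem.Str.lower w) && decide (i > 0) then
      PySem.List.pyGet? words (i - 1)
    else pvAInnerGo words rest

-- outer loop of A: first line whose .lower() contains 'gharana', then break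
def pvAOuter : List String → Option String
  | [] => none
  | l :: rest =>
    if PySem.Str.isIn "gharana" (PySem.Str.lower l) then
      pvAInnerGo (PySem.Str.split₀ l) (PySem.List.enumerate (PySem.Str.split₀ l) 0)
    else pvAOuter rest

def extract_gharana_name_py (lines : List String) (text_lower : String) : Option String :=
  if PySem.Str.isIn "gharana" text_lower then pvAOuter lines else none

-- ===== PORT B =====
-- Hand port (PySem has no regex) of re.search(r'(\S+)\s+\S*gharana', line, re.IGNORECASE).
-- It is exact for THIS pattern because backtracking is vacuous: the greedy \S+ must end at the
-- whitespace boundary (any shorter match puts a non-space under \s), the greedy \s+ must consume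
-- the whole whitespace run (any shorter match puts a space under the 'g' that follows \S*), and
-- '\S*gharana' then succeeds iff the following non-space run contains 'gharana' (IGNORECASE on
-- the pattern's ASCII letters = compare lowercased, which is what Chars.lower does).

def pvGh : List Char := "gharana".toList
def pvNonspace (c : Char) : Bool := !(PySem.Chars.isspace c)

-- one attempt of the regex at the start of s; 'some g' = match with group(1) = g
-- (\S+ run; then the \s+ run; then the following non-space run must contain 'gharana')
def pvReTry (s : List Char) : Option (List Char) :=
  if (s.takeWhile pvNonspace).length = 0 then none
  else if ((s.drop (s.takeWhile pvNonspace).length).takeWhile PySem.Chars.isspace).length = 0 then none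
  else if PySem.Chars.isIn pvGh (PySem.Chars.lower
      (((s.drop (s.takeWhile pvNonspace).length).drop
          ((s.drop (s.takeWhile pvNonspace).length).takeWhile PySem.Chars.isspace).length).takeWhile pvNonspace))
    then some (s.takeWhile pvNonspace) else none

-- re.search: try every start position left to right
def pvReSearch : List Char → Option (List Char)
  | [] => none
  | c :: t =>
    match pvReTry (c :: t) with
    | some g => some g
    | none => pvReSearch t

-- outer loop of B (same as B's Python: first line whose .lower() contains 'gharana', then break)
def pvBOuter : List String → Option String
  | [] => none
  | l :: rest =>
    if PySem.Str.isIn "gharana" (PySem.Str.lower l) then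
      (pvReSearch l.toList).map String.ofList
    else pvBOuter rest

def extract_gharana_name_py_alt (lines : List String) (text_lower : String) : Option String :=
  if PySem.Str.isIn "gharana" text_lower then pvBOuter lines else none

-- ===== PRECONDITION & SPEC =====
def Spec_extract_gharana_name_py (lines : List String) (text_lower : String) (out : Option String) : Prop := out = extract_gharana_name_py_alt lines text_lower
instance (lines : List String) (text_lower : String) (out : Option String) : Decidable (Spec_extract_gharana_name_py lines text_lower out) := by unfold Spec_extract_gharana_name_py; infer_instance

-- ===== CLAIM (what is proved, stated in full; the proofs are below) =====
def Claim_equal_extract_gharana_name_py : Prop := ∀ (lines : List String) (text_lower : String), Dom_extract_gharana_name_py lines text_lower → Spec_extract_gharana_name_py lines text_lower (extract_gharana_name_py lines text_lower)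

-- ===== LEMMAS AND PROOFS =====

-- word-level search target: first pair (prev, w) with 'gharana' in w.lower() (char lists)
def pvWFind (ws : List (List Char)) : Option (List Char) :=
  ((ws.zip ws.tail).find?
    (fun pw => PySem.Chars.isIn pvGh (PySem.Chars.lower pw.2))).map Prod.fst


theorem tw_dw (p : Char → Bool) (l : List Char) : (l.dropWhile p).takeWhile p = [] := by
  cases h : l.dropWhile p with
  | nil => rfl
  | cons d t =>
    have hd : p d = false := by
      have := List.dropWhile_get_zero_not (p := p) (l := l) (by simp [h])
      simpa [h] using this
    simp [hd]
theorem drop_tw (p : Char → Bool) (l : List Char) : l.drop (l.takeWhile p).length = l.dropWhile p := by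
  calc l.drop (l.takeWhile p).length
      = ((l.takeWhile p) ++ (l.dropWhile p)).drop (l.takeWhile p).length := by
        rw [List.takeWhile_append_dropWhile]
    _ = l.dropWhile p := List.drop_left

theorem search_cons_none (c : Char) (t : List Char) (h : pvReTry (c :: t) = none) :
    pvReSearch (c :: t) = pvReSearch t := by
  conv_lhs => unfold pvReSearch
  rw [h]

theorem reTry_space (c : Char) (t : List Char) (h : PySem.Chars.isspace c = true) :
    pvReTry (c :: t) = none := by
  unfold pvReTry
  simp [pvNonspace, h]

theorem reTry_run (r rest : List Char) (hr : r ≠ []) (hns : ∀ c ∈ r, pvNonspace c = true)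
    (hrest : rest.takeWhile pvNonspace = []) :
    pvReTry (r ++ rest)
      = if PySem.Chars.isIn pvGh
            (PySem.Chars.lower ((rest.dropWhile PySem.Chars.isspace).takeWhile pvNonspace))
        then some r else none := by
  unfold pvReTry
  have htw : (r ++ rest).takeWhile pvNonspace = r := by
    rw [List.takeWhile_append_of_pos hns, hrest, List.append_nil]
  rw [htw]
  rw [if_neg (by simp [hr])]
  have hdrop : (r ++ rest).drop r.length = rest := List.drop_left
  rw [hdrop]
  cases hrestc : rest with
  | nil => simp [pvGh]; decide
  | cons d t =>
    have hd : pvNonspace d = false := by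
      by_contra hcon
      rw [hrestc] at hrest
      simp [eq_true_of_ne_false hcon] at hrest
    have hds : PySem.Chars.isspace d = true := by simpa [pvNonspace] using hd
    have hws : (d :: t).takeWhile PySem.Chars.isspace = d :: t.takeWhile PySem.Chars.isspace := by
      simp [hds]
    rw [if_neg (by rw [hws]; simp)]
    rw [drop_tw PySem.Chars.isspace (d :: t)]

theorem skip_spaces (w : List Char) (hw : ∀ c ∈ w, PySem.Chars.isspace c = true) (rest : List Char) :
    pvReSearch (w ++ rest) = pvReSearch rest := by
  induction w with
  | nil => simp
  | cons c t ih =>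
    rw [List.cons_append, search_cons_none c (t ++ rest) (reTry_space c _ (hw c (by simp)))]
    exact ih (fun x hx => hw x (by simp [hx]))

theorem skip_run (r : List Char) (hns : ∀ c ∈ r, pvNonspace c = true) (rest : List Char)
    (hrest : rest.takeWhile pvNonspace = [])
    (hg : PySem.Chars.isIn pvGh
        (PySem.Chars.lower ((rest.dropWhile PySem.Chars.isspace).takeWhile pvNonspace)) = false) :
    pvReSearch (r ++ rest) = pvReSearch rest := by
  induction r with
  | nil => simp
  | cons c t ih =>
    have htry : pvReTry ((c :: t) ++ rest) = none := by
      rw [reTry_run (c :: t) rest (by simp) hns hrest, if_neg (by simp [hg])]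
    rw [List.cons_append] at htry
    rw [List.cons_append, search_cons_none c (t ++ rest) htry]
    exact ih (fun x hx => hns x (by simp [hx]))

theorem search_cons_some (c : Char) (t g : List Char) (h : pvReTry (c :: t) = some g) :
    pvReSearch (c :: t) = some g := by
  conv_lhs => unfold pvReSearch
  rw [h]

theorem go_acc : ∀ (s cur : List Char) (acc : List (List Char)),
    PySem.Chars.split₀.go s cur acc = acc.reverse ++ PySem.Chars.split₀.go s cur [] := by
  intro s
  induction s with
  | nil =>
    intro cur acc
    rw [PySem.Chars.split₀.go, PySem.Chars.split₀.go]
    by_cases h : cur.isEmpty = true <;> simp [h]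
  | cons c t ih =>
    intro cur acc
    by_cases h : PySem.Chars.isspace c = true
    · by_cases h2 : cur.isEmpty = true
      · rw [PySem.Chars.split₀.go]; simp only [h, h2, if_true]
        conv_rhs => rw [PySem.Chars.split₀.go]
        simp only [h, h2, if_true]
        exact ih [] acc
      · rw [PySem.Chars.split₀.go]; simp only [h, h2, if_true]
        conv_rhs => rw [PySem.Chars.split₀.go]
        simp only [h, h2, if_true]
        rw [ih [] (([cur.reverse]) : List (List Char)), ih [] (cur.reverse :: acc)]
        simp
    · rw [PySem.Chars.split₀.go]
      simp only [Bool.not_eq_true] at h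
      simp only [h, Bool.false_eq_true, if_false]
      conv_rhs => rw [PySem.Chars.split₀.go]
      simp only [h, Bool.false_eq_true, if_false]
      exact ih (c :: cur) acc

theorem pvSplit_space (c : Char) (cs : List Char) (h : PySem.Chars.isspace c = true) :
    PySem.Chars.split₀ (c :: cs) = PySem.Chars.split₀ cs := by
  unfold PySem.Chars.split₀
  rw [PySem.Chars.split₀.go]; simp [h]

theorem go_run : ∀ (r : List Char), (∀ c ∈ r, PySem.Chars.isspace c = false) →
    ∀ (rest cur : List Char) (acc : List (List Char)),
    PySem.Chars.split₀.go (r ++ rest) cur acc = PySem.Chars.split₀.go rest (r.reverse ++ cur) acc := by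
  intro r
  induction r with
  | nil => intro _ rest cur acc; simp
  | cons c t ih =>
    intro hns rest cur acc
    have hc : PySem.Chars.isspace c = false := hns c (by simp)
    rw [List.cons_append, PySem.Chars.split₀.go]
    simp only [hc, Bool.false_eq_true, if_false]
    rw [ih (fun x hx => hns x (by simp [hx])) rest (c :: cur) acc]
    simp

theorem pvSplit_word (c : Char) (cs : List Char) (h : PySem.Chars.isspace c = false) :
    PySem.Chars.split₀ (c :: cs)
      = (c :: cs.takeWhile pvNonspace) :: PySem.Chars.split₀ (cs.dropWhile pvNonspace) := by
  unfold PySem.Chars.split₀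
  have hsplit : c :: cs = (c :: cs.takeWhile pvNonspace) ++ cs.dropWhile pvNonspace := by
    simp [List.takeWhile_append_dropWhile]
  rw [hsplit, go_run]
  · cases hd : cs.dropWhile pvNonspace with
    | nil =>
      rw [PySem.Chars.split₀.go]
      rw [if_neg (by simp)]
      rw [PySem.Chars.split₀.go]
      simp
    | cons d t =>
      have hdns : pvNonspace d = false := by
        have := List.dropWhile_get_zero_not (p := pvNonspace) (l := cs) (by simp [hd])
        simpa [hd] using this
      have hds : PySem.Chars.isspace d = true := by
        simpa [pvNonspace] using hdns
      rw [PySem.Chars.split₀.go]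
      simp only [hds, if_true]
      rw [if_neg (by simp)]
      rw [go_acc t]
      rw [show PySem.Chars.split₀.go (d :: t) [] [] = PySem.Chars.split₀.go t [] [] by
        rw [PySem.Chars.split₀.go]; simp [hds]]
      simp
  · intro x hx
    rcases List.mem_cons.mp hx with h1 | h2
    · simpa [h1] using h
    · have := List.mem_takeWhile_imp h2
      simpa [pvNonspace] using this

theorem pvSplit_dropSpaces (l : List Char) :
    PySem.Chars.split₀ l = PySem.Chars.split₀ (l.dropWhile PySem.Chars.isspace) := by
  induction l with
  | nil => rfl
  | cons c t ih =>
    by_cases h : PySem.Chars.isspace c = true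
    · rw [pvSplit_space c t h, ih]
      simp [h]
    · simp [eq_false_of_ne_true h]

theorem gh_lower_nil : PySem.Chars.isIn pvGh (PySem.Chars.lower []) = false := by decide

theorem pvWFind_cons_cons (a b : List Char) (l : List (List Char)) :
    pvWFind (a :: b :: l)
      = if PySem.Chars.isIn pvGh (PySem.Chars.lower b) then some a else pvWFind (b :: l) := by
  unfold pvWFind
  by_cases h : PySem.Chars.isIn pvGh (PySem.Chars.lower b) = true <;> simp [h]

theorem pvMain : ∀ (n : Nat) (s : List Char), s.length ≤ n →
    pvReSearch s = pvWFind (PySem.Chars.split₀ s) := by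
  intro n
  induction n with
  | zero =>
    intro s hs
    have : s = [] := List.eq_nil_of_length_eq_zero (Nat.le_zero.mp hs)
    subst this
    decide
  | succ n ih =>
    intro s hs
    cases s with
    | nil => decide
    | cons c t =>
      by_cases hc : PySem.Chars.isspace c = true
      · rw [search_cons_none c t (reTry_space c t hc), pvSplit_space c t hc]
        exact ih t (by simp at hs; omega)
      · have hcb : PySem.Chars.isspace c = false := eq_false_of_ne_true hc
        have hcn : pvNonspace c = true := by simp [pvNonspace, hcb]
        have hs' : c :: t = (c :: t.takeWhile pvNonspace) ++ t.dropWhile pvNonspace := by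
          simp [List.takeWhile_append_dropWhile]
        have hrestTW : (t.dropWhile pvNonspace).takeWhile pvNonspace = [] := tw_dw _ t
        have hnsr : ∀ x ∈ c :: t.takeWhile pvNonspace, pvNonspace x = true := by
          intro x hx
          rcases List.mem_cons.mp hx with h1 | h2
          · rw [h1]; exact hcn
          · exact List.mem_takeWhile_imp h2
        have hsplit := pvSplit_word c t hcb
        have hlenrest : (t.dropWhile pvNonspace).length ≤ t.length := List.length_dropWhile_le _ _
        have hlenrest2 :
            ((t.dropWhile pvNonspace).dropWhile PySem.Chars.isspace).length ≤ t.length :=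
          le_trans (List.length_dropWhile_le _ _) hlenrest
        have hlen_t : t.length ≤ n := by simpa using Nat.lt_succ_iff.mp (by simpa using hs)
        -- abbreviations
        by_cases hg : PySem.Chars.isIn pvGh (PySem.Chars.lower
            (((t.dropWhile pvNonspace).dropWhile PySem.Chars.isspace).takeWhile pvNonspace)) = true
        · -- the regex matches at this first token
          have htry : pvReTry ((c :: t.takeWhile pvNonspace) ++ t.dropWhile pvNonspace)
              = some (c :: t.takeWhile pvNonspace) := by
            rw [reTry_run _ _ (by simp) hnsr hrestTW, if_pos hg]
          rw [List.cons_append] at htry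
          have hLHS : pvReSearch (c :: t) = some (c :: t.takeWhile pvNonspace) := by
            rw [show c :: t = c :: (t.takeWhile pvNonspace ++ t.dropWhile pvNonspace) by
              simp]
            exact search_cons_some _ _ _ htry
          rw [hLHS, hsplit, pvSplit_dropSpaces (t.dropWhile pvNonspace)]
          -- the token list after the spaces starts with the matched token
          have htokne : ((t.dropWhile pvNonspace).dropWhile PySem.Chars.isspace) ≠ [] := by
            intro hnil
            rw [hnil] at hg
            simp [gh_lower_nil] at hg
          cases hr2 : (t.dropWhile pvNonspace).dropWhile PySem.Chars.isspace with
          | nil => exact absurd hr2 htokne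
          | cons d t2 =>
            have hdns : PySem.Chars.isspace d = false := by
              have := List.dropWhile_get_zero_not (p := PySem.Chars.isspace)
                (l := t.dropWhile pvNonspace) (by simp [hr2])
              simpa [hr2] using this
            have hdn : pvNonspace d = true := by simp [pvNonspace, hdns]
            rw [pvSplit_word d t2 hdns, pvWFind_cons_cons]
            rw [if_pos (by rw [hr2] at hg; simpa [hdn] using hg)]
        · -- no match at this token: skip the run and the spaces
          have hgf : PySem.Chars.isIn pvGh (PySem.Chars.lower
              (((t.dropWhile pvNonspace).dropWhile PySem.Chars.isspace).takeWhile pvNonspace))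
              = false := eq_false_of_ne_true hg
          have hLHS : pvReSearch (c :: t)
              = pvReSearch ((t.dropWhile pvNonspace).dropWhile PySem.Chars.isspace) := by
            rw [show c :: t = (c :: t.takeWhile pvNonspace) ++ t.dropWhile pvNonspace from hs']
            rw [skip_run _ hnsr _ hrestTW hgf]
            rw [show t.dropWhile pvNonspace
                = (t.dropWhile pvNonspace).takeWhile PySem.Chars.isspace
                  ++ (t.dropWhile pvNonspace).dropWhile PySem.Chars.isspace by
              rw [List.takeWhile_append_dropWhile]]
            rw [skip_spaces _ (fun x hx => List.mem_takeWhile_imp hx) _]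
            rw [← drop_tw, ← List.takeWhile_append_dropWhile
              (p := PySem.Chars.isspace) (l := t.dropWhile pvNonspace)]
            simp [drop_tw]
          rw [hLHS, hsplit, pvSplit_dropSpaces (t.dropWhile pvNonspace)]
          rw [ih _ (le_trans hlenrest2 hlen_t)]
          cases hr2 : (t.dropWhile pvNonspace).dropWhile PySem.Chars.isspace with
          | nil => rfl
          | cons d t2 =>
            have hdns : PySem.Chars.isspace d = false := by
              have := List.dropWhile_get_zero_not (p := PySem.Chars.isspace)
                (l := t.dropWhile pvNonspace) (by simp [hr2])
              simpa [hr2] using this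
            have hdn : pvNonspace d = true := by simp [pvNonspace, hdns]
            rw [pvSplit_word d t2 hdns, pvWFind_cons_cons]
            rw [if_neg (by rw [hr2] at hgf; simp [hdn] at hgf; simp [hgf])]

-- A's inner scan from position pre.length+1, with 'prev' the word just before it,
-- equals the zip-with-tail search on prev :: suffix.
theorem pvInnerGo_eq (suffix : List String) : ∀ (pre : List String) (prev : String),
    pvAInnerGo (pre ++ prev :: suffix) (PySem.List.enumerate suffix ((pre.length : Int) + 1))
      = (((prev :: suffix).zip suffix).find?
          (fun pw => PySem.Str.isIn "gharana" (PySem.Str.lower pw.2))).map Prod.fst := by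
  induction suffix with
  | nil => intro pre prev; simp [PySem.List.enumerate, pvAInnerGo]
  | cons w rest ih =>
    intro pre prev
    rw [PySem.List.enumerate_cons]
    by_cases hw : PySem.Str.isIn "gharana" (PySem.Str.lower w) = true
    · have hgt : ((pre.length : Int) + 1 > 0) := by omega
      simp only [pvAInnerGo, hw, hgt, decide_true, Bool.and_self, if_true,
        List.zip_cons_cons, List.find?_cons]
      have hidx : (pre.length : Int) + 1 - 1 = (pre.length : Int) := by ring
      rw [hidx, PySem.List.pyGet?_append_length]
      simp
    · rw [Bool.not_eq_true] at hw
      simp only [pvAInnerGo, hw, Bool.false_and, Bool.false_eq_true, if_false,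
        List.zip_cons_cons, List.find?_cons]
      have harr : pre ++ prev :: w :: rest = (pre ++ [prev]) ++ w :: rest := by simp
      have hlen : (pre.length : Int) + 1 + 1 = ((pre ++ [prev]).length : Int) + 1 := by
        simp
      rw [harr, hlen, ih (pre ++ [prev]) w]

-- A's inner loop on a whole word list equals the zip-with-tail search.
theorem pvInner_eq (ws : List String) :
    pvAInnerGo ws (PySem.List.enumerate ws 0)
      = ((ws.zip ws.tail).find?
          (fun pw => PySem.Str.isIn "gharana" (PySem.Str.lower pw.2))).map Prod.fst := by
  cases ws with
  | nil => simp [PySem.List.enumerate, pvAInnerGo]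
  | cons w rest =>
    rw [PySem.List.enumerate_cons]
    simp only [pvAInnerGo]
    rw [if_neg (by simp)]
    have := pvInnerGo_eq rest [] w
    simpa using this

-- the String-level zip search is the char-level one, mapped through String.ofList
theorem pvWFind_map (ws : List String) :
    ((ws.zip ws.tail).find?
        (fun pw => PySem.Str.isIn "gharana" (PySem.Str.lower pw.2))).map Prod.fst
      = (pvWFind (ws.map String.toList)).map String.ofList := by
  induction ws with
  | nil => rfl
  | cons a tl ih =>
    cases tl with
    | nil => rfl
    | cons b l =>
      have hpred : PySem.Str.isIn "gharana" (PySem.Str.lower b)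
          = PySem.Chars.isIn pvGh (PySem.Chars.lower b.toList) := by
        simp [pvGh, pysem]
      by_cases hb : PySem.Chars.isIn pvGh (PySem.Chars.lower b.toList) = true
      · unfold pvWFind
        simp only [List.map_cons, List.tail_cons, List.zip_cons_cons, List.find?_cons,
          hpred, hb]
        simp [String.ofList_toList]
      · unfold pvWFind at ih ⊢
        simp only [List.map_cons, List.tail_cons, List.zip_cons_cons, List.find?_cons,
          hpred, hb]
        simpa using ih

-- A's full per-line extraction equals the regex search, via the word-level search
theorem pvLine_eq (l : String) :
    pvAInnerGo (PySem.Str.split₀ l) (PySem.List.enumerate (PySem.Str.split₀ l) 0)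
      = (pvReSearch l.toList).map String.ofList := by
  rw [pvInner_eq, pvWFind_map]
  rw [show (PySem.Str.split₀ l).map String.toList = PySem.Chars.split₀ l.toList by simp [pysem]]
  rw [← pvMain l.toList.length l.toList le_rfl]

-- outer loops agree line by line
theorem pvOuter_eq (lines : List String) : pvAOuter lines = pvBOuter lines := by
  induction lines with
  | nil => rfl
  | cons l rest ih =>
    by_cases hl : PySem.Str.isIn "gharana" (PySem.Str.lower l) = true
    · simp only [pvAOuter, pvBOuter, hl, if_true]
      exact pvLine_eq l
    · simp only [pvAOuter, pvBOuter, hl, Bool.false_eq_true, if_false, ih]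

-- ===== VERDICT (by name: the statement is the Claim_ definition above) =====
theorem extract_gharana_name_py_spec : Claim_equal_extract_gharana_name_py := by
  intro lines text_lower _
  unfold Spec_extract_gharana_name_py extract_gharana_name_py extract_gharana_name_py_alt
  rw [pvOuter_eq]
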